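-- pv_equiv track=rewrite | github.com/Jit-Paul-2008/Hexamind | ai-service/competitive_research.py | _insert_ledger_row
-- ===== SOURCE A (Python) =====
-- def _insert_ledger_row(lines: list[str], row: str) -> list[str]:
--     try:
--         graph_start = next(index for index, line in enumerate(lines) if line.strip() == "## Line Graph")
--     except StopIteration:
--         return lines + ["", row]
--
--     try:
--         table_start = next(index for index, line in enumerate(lines) if line.strip() == "## Latest Status")
--     except StopIteration:
--         return lines + ["", row]
--
--     try:
--         graph_index = next(index for index in range(table_start, graph_start) if lines[index].startswith("| 0 "))
--     except StopIteration:
--         return lines[:graph_start] + [row, ""] + lines[graph_start:]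
--
--     updated = list(lines)
--     updated.insert(graph_start, row)
--     updated.insert(graph_start + 1, "")
--     return updated
-- ===== SOURCE B (Python) =====
-- def _insert_ledger_row(lines: list[str], row: str) -> list[str]:
--     g = None
--     t = None
--     for i, line in enumerate(lines):
--         s = line.strip()
--         if g is None and s == "## Line Graph":
--             g = i
--         if t is None and s == "## Latest Status":
--             t = i
--     if g is None or t is None:
--         return lines + ["", row]
--     return lines[:g] + [row, ""] + lines[g:]
-- ===== Notes on version B (the rewrite author's own statement) =====
-- stated objective: simpler
-- what changed: One combined pass over lines records the first indices of both markers; the '| 0 ' range scan of A is omitted entirely because A's two final branches return the same list, so B has a single concatenation after the loop.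
import Mathlib
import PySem

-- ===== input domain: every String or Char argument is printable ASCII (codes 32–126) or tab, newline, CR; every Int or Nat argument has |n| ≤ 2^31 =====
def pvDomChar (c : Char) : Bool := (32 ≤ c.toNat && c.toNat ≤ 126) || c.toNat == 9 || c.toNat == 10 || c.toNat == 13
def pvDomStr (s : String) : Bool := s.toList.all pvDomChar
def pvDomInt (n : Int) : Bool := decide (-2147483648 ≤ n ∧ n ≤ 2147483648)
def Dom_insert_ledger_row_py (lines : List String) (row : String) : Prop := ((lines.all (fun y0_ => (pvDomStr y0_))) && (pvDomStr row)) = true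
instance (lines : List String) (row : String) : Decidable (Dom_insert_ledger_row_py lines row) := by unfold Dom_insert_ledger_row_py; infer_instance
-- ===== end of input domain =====

-- B merges A's two marker scans into one pass and drops A's dead '| 0 ' range scan (both of A's final branches return the same list); objective: simpler.

-- ===== PORT A =====
def insert_ledger_row_py (lines : List String) (row : String) : List String :=
  match (PySem.List.enumerate lines 0).find? (fun p => PySem.Str.strip p.2 == "## Line Graph") with
  | none => lines ++ ["", row]
  | some pg =>
    match (PySem.List.enumerate lines 0).find? (fun p => PySem.Str.strip p.2 == "## Latest Status") with
    | none => lines ++ ["", row]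
    | some pt =>
      -- lines[index] is always in range here (indices come from enumerate), so pyGetD is exact
      match (PySem.List.pyRange pt.1 pg.1 1).find? (fun i => PySem.Str.startswith (PySem.List.pyGetD lines i "") "| 0 ") with
      | none => PySem.List.slice lines none (some pg.1) ++ [row, ""] ++ PySem.List.slice lines (some pg.1) none
      | some _ => PySem.List.insert (PySem.List.insert lines pg.1 row) (pg.1 + 1) ""

-- ===== PORT B =====
def insert_ledger_row_py_alt (lines : List String) (row : String) : List String :=
  let st := (PySem.List.enumerate lines 0).foldl
    (fun (acc : Option Int × Option Int) p =>
      let s := PySem.Str.strip p.2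
      (if acc.1 = none ∧ s = "## Line Graph" then some p.1 else acc.1,
       if acc.2 = none ∧ s = "## Latest Status" then some p.1 else acc.2))
    (none, none)
  match st with
  | (some g, some _) => PySem.List.slice lines none (some g) ++ [row, ""] ++ PySem.List.slice lines (some g) none
  | _ => lines ++ ["", row]

-- ===== PRECONDITION & SPEC =====
def Spec_insert_ledger_row_py (lines : List String) (row : String) (out : List String) : Prop := out = insert_ledger_row_py_alt lines row
instance (lines : List String) (row : String) (out : List String) : Decidable (Spec_insert_ledger_row_py lines row out) := by unfold Spec_insert_ledger_row_py; infer_instance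

-- ===== CLAIM (what is proved, stated in full; the proofs are below) =====
def Claim_equal_insert_ledger_row_py : Prop := ∀ (lines : List String) (row : String), Dom_insert_ledger_row_py lines row → Spec_insert_ledger_row_py lines row (insert_ledger_row_py lines row)

-- ===== LEMMAS AND PROOFS =====

-- B's early-lock pair fold computes the first indices the two find? scans of A compute.
theorem pv_foldl_pair_lock (l : List (Int × String)) (m1 m2 : String) (a b : Option Int) :
    l.foldl (fun (acc : Option Int × Option Int) p =>
      let s := PySem.Str.strip p.2
      (if acc.1 = none ∧ s = m1 then some p.1 else acc.1,
       if acc.2 = none ∧ s = m2 then some p.1 else acc.2)) (a, b)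
    = (a.or ((l.find? (fun p => PySem.Str.strip p.2 == m1)).map (·.1)),
       b.or ((l.find? (fun p => PySem.Str.strip p.2 == m2)).map (·.1))) := by
  induction l generalizing a b with
  | nil => simp
  | cons p l ih =>
    simp only [List.foldl_cons, List.find?_cons]
    by_cases h1 : PySem.Str.strip p.2 = m1 <;> by_cases h2 : PySem.Str.strip p.2 = m2 <;>
      first
        | (subst h1; subst h2; cases a <;> cases b <;> simp [ih, Option.or])
        | (subst h1; have hb2 : (PySem.Str.strip p.2 == m2) = false := beq_eq_false_iff_ne.mpr h2;
           cases a <;> cases b <;> simp [ih, h2, hb2, Option.or])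
        | (subst h2; have hb1 : (PySem.Str.strip p.2 == m1) = false := beq_eq_false_iff_ne.mpr h1;
           cases a <;> cases b <;> simp [ih, h1, hb1, Option.or])
        | (have hb1 : (PySem.Str.strip p.2 == m1) = false := beq_eq_false_iff_ne.mpr h1;
           have hb2 : (PySem.Str.strip p.2 == m2) = false := beq_eq_false_iff_ne.mpr h2;
           cases a <;> cases b <;> simp [ih, h1, h2, hb1, hb2, Option.or])

theorem pv_insert_insert (lines : List String) (row : String) (k : Nat) (hk : k ≤ lines.length) :
    PySem.List.insert (PySem.List.insert lines (k : Int) row) ((k : Int) + 1) ""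
      = lines.take k ++ [row, ""] ++ lines.drop k := by
  rw [PySem.List.insert_natCast lines k row hk]
  have h1 : ((k : Int) + 1) = ((k + 1 : Nat) : Int) := by push_cast; ring
  rw [h1, PySem.List.insert_natCast _ (k + 1) "" (by simp; omega)]
  have h1l : (lines.take k).length = k := by simp; omega
  simp [List.take_append, List.drop_append, h1l,
    List.take_of_length_le (le_of_eq_of_le h1l (Nat.le_succ k)),
    List.drop_eq_nil_of_le (le_of_eq_of_le h1l (Nat.le_succ k))]

-- ===== VERDICT (by name: the statement is the Claim_ definition above) =====
theorem insert_ledger_row_py_spec : Claim_equal_insert_ledger_row_py := by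
  intro lines row _
  unfold Spec_insert_ledger_row_py insert_ledger_row_py insert_ledger_row_py_alt
  rw [pv_foldl_pair_lock]
  cases hg : (PySem.List.enumerate lines 0).find? (fun p => PySem.Str.strip p.2 == "## Line Graph") with
  | none => simp [Option.or]
  | some pg =>
    cases ht : (PySem.List.enumerate lines 0).find? (fun p => PySem.Str.strip p.2 == "## Latest Status") with
    | none => simp [Option.or]
    | some pt =>
      simp only [Option.or, Option.map]
      have hmem : pg ∈ PySem.List.enumerate lines 0 := List.mem_of_find?_eq_some hg
      obtain ⟨k, hklt, hpg⟩ := (PySem.List.mem_enumerate_iff lines 0 pg).mp hmem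
      cases hr : (PySem.List.pyRange pt.1 pg.1 1).find? (fun i => PySem.Str.startswith (PySem.List.pyGetD lines i "") "| 0 ") with
      | none => rfl
      | some _ =>
        have hpg1 : pg.1 = (k : Int) := by rw [hpg]; simp
        rw [hpg1, pv_insert_insert lines row k (le_of_lt hklt),
          PySem.List.slice_to_natCast, PySem.List.slice_from_natCast]
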